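-- pv_equiv track=rewrite | github.com/Aviatore/ask-mate-1 | util.py | parse_search_phrase
-- ===== SOURCE A (Python) =====
-- def parse_search_phrase(search_phrase):
--     # Get a list of indexes of double quotes
--     indexes = [index for index, value in enumerate(search_phrase) if value == '"']
--
--     quoted = []
--     unquoted = []
--
--     # If the list contains odd number of indexes, remove the last one
--     if len(indexes) % 2 != 0:
--         indexes = indexes[0:-1]
--
--     # Get a list of tuples of index pairs, e.g. [(1,7), (12,23)]
--     prev_start = 0
--     for start, stop in zip(*[iter(indexes)] * 2):
--         quoted.append(search_phrase[start + 1:stop])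
--
--         if start > prev_start:
--             unquoted.append(search_phrase[prev_start:start])
--
--         prev_start = stop + 1
--
--     if len(search_phrase) > prev_start:
--         unquoted.append(search_phrase[prev_start:])
--
--     # Split unquoted phrase by spaces
--     unquoted_single_words = []
--     for phrase in unquoted:  # e.g. ['hej  ho'] - string contains double spaces
--         words = [i.strip() for i in phrase.split(' ')]  # e.g. ['hej', '', 'ho']
--         words_no_blanks = [i for i in words if i != '']  # e.g. ['hej', 'ho']
--         unquoted_single_words.extend(words_no_blanks)
--
--     return quoted, unquoted_single_words
-- ===== SOURCE B (Python) =====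
-- def _single_words(segment):
--     stripped = [w.strip() for w in segment.split(' ')]
--     return [w for w in stripped if w != '']
--
--
-- def parse_search_phrase(search_phrase):
--     # Single left-to-right scan: find the next pair of quotes, emit the quoted
--     # content and the words of the gap before it, and continue after the pair.
--     # An unpaired final quote stays in the tail as a literal character.
--     quoted = []
--     words = []
--     rest = search_phrase
--     while True:
--         i = rest.find('"')
--         j = rest.find('"', i + 1) if i != -1 else -1
--         if j == -1:
--             words.extend(_single_words(rest))
--             return quoted, words
--         quoted.append(rest[i + 1:j])
--         words.extend(_single_words(rest[:i]))
--         rest = rest[j + 1:]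
-- ===== Notes on version B (the rewrite author's own statement) =====
-- stated objective: faster
-- what changed: A first collects every quote index with a per-character enumerate pass, pairs the indexes, and slices the whole phrase by absolute positions in a second pass; B is a single left-to-right scan that repeatedly str.find's the next pair of quotes and consumes the string, never building an index list.
import Mathlib
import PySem

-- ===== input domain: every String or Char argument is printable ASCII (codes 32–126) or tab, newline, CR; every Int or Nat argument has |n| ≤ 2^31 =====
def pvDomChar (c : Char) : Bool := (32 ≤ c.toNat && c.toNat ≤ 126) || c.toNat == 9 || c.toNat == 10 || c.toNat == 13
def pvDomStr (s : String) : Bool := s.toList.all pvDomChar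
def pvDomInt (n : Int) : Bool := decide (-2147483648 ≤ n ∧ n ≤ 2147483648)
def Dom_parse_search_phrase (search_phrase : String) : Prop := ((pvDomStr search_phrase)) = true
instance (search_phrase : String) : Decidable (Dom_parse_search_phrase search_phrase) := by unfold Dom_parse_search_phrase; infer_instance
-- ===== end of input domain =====

-- B is a single left-to-right scan finding quote pairs with str.find instead of A's
-- collect-all-quote-indexes / pair / absolute-slice two-phase pass; measurably faster by constant factor.

-- ===== PORT A =====
-- Shared helper: the word phase both Pythons contain verbatim:
-- `words = [i.strip() for i in phrase.split(' ')]` then keep the non-'' ones.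
def pvWords (phrase : List Char) : List (List Char) :=
  ((PySem.Chars.splitOn phrase [' ']).map PySem.Chars.strip).filter (fun w => w ≠ [])

-- `zip(*[iter(indexes)] * 2)`: consecutive disjoint pairs (an odd leftover is dropped).
def pvPairs : List Int → List (Int × Int)
  | i :: j :: t => (i, j) :: pvPairs t
  | _ => []

-- A's `for start, stop in …` loop with the trailing `if len(...) > prev_start` append;
-- carries `prev_start` and returns (quoted, unquoted) as accumulated by the Python appends.
def pvALoop (cs : List Char) : List (Int × Int) → Int → List (List Char) × List (List Char)
  | [], prev =>
      ([], if (cs.length : Int) > prev then [PySem.List.slice cs (some prev) none] else [])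
  | (start, stop) :: rest, prev =>
      let r := pvALoop cs rest (stop + 1)
      (PySem.List.slice cs (some (start + 1)) (some stop) :: r.1,
       (if start > prev then [PySem.List.slice cs (some prev) (some start)] else []) ++ r.2)

def parse_search_phrase (search_phrase : String) : List String × List String :=
  let cs := search_phrase.toList
  let indexes : List Int :=
    (PySem.List.enumerate cs).filterMap (fun p => if p.2 = '"' then some p.1 else none)
  -- `len(indexes) % 2 != 0` on a Python int that is a length: Nat `%` is exact here
  let indexes := if indexes.length % 2 ≠ 0 then PySem.List.slice indexes (some 0) (some (-1)) else indexes
  let res := pvALoop cs (pvPairs indexes) 0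
  let words := res.2.foldl (fun acc ph => acc ++ pvWords ph) []
  (res.1.map String.mk, words.map String.mk)

-- ===== PORT B =====
-- `j = rest.find('"', i + 1) if i != -1 else -1` with `i = rest.find('"')`.
def pvJ (rest : List Char) : Int :=
  let i := PySem.Chars.find rest ['"']
  if i ≠ -1 then PySem.Chars.findFrom rest ['"'] (i + 1) else -1

-- Termination support for the scan (also reused by the equivalence proof below).
theorem pvPrefix_singleton (c : Char) (l : List Char) : ([c] <+: l) ↔ l.head? = some c := by
  constructor
  · rintro ⟨t, rfl⟩; rfl
  · intro h; cases l with
    | nil => simp at h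
    | cons x t => simp at h; exact ⟨t, by simp [h]⟩

theorem pvDropPre (pre rest : List Char) (n : Nat) :
    List.drop (pre.length + n) (pre ++ rest) = List.drop n rest := by
  rw [List.drop_append, List.drop_eq_nil_of_le (by omega), Nat.add_sub_cancel_left]
  simp

theorem pvFind_no_quote {s : List Char} (h : '"' ∉ s) : PySem.Chars.find s ['"'] = -1 :=
  (PySem.Chars.find_eq_neg_one_iff s ['"']).mpr (fun hin => h ((List.singleton_infix_iff ..).mp hin))

theorem pvFind_append (a r : List Char) (h : '"' ∉ a) :
    PySem.Chars.find (a ++ '"' :: r) ['"'] = (a.length : Int) := by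
  have hs : a ++ '"' :: r = a ++ ['"'] ++ r := by simp
  have hin : ['"'] <:+: a ++ '"' :: r := by rw [hs]; exact ⟨a, r, rfl⟩
  have h0 : 0 ≤ PySem.Chars.find (a ++ '"' :: r) ['"'] :=
    (PySem.Chars.find_nonneg_iff ..).mpr hin
  obtain ⟨hpre, hmin⟩ := PySem.Chars.find_spec h0
  set n := (PySem.Chars.find (a ++ '"' :: r) ['"']).toNat with hn
  have hget : (a ++ '"' :: r)[n]? = some '"' := by
    rw [← List.head?_drop]; exact (pvPrefix_singleton ..).mp hpre
  have hlt : ¬ n < a.length := by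
    intro hlt
    rw [List.getElem?_append_left hlt] at hget
    exact h (List.mem_of_getElem? hget)
  have hle : n ≤ a.length := by
    by_contra hgt
    refine hmin a.length (by omega) ?_
    rw [show (a.length : Nat) = a.length + 0 by ring, pvDropPre]
    exact ⟨r, rfl⟩
  have : n = a.length := by omega
  omega

theorem pvSplitFirst (cs : List Char) : ('"' ∉ cs) ∨ ∃ a r, cs = a ++ '"' :: r ∧ '"' ∉ a := by
  induction cs with
  | nil => exact Or.inl (by simp)
  | cons c t ih =>
      by_cases hc : c = '"'
      · exact Or.inr ⟨[], t, by simp [hc], by simp⟩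
      · rcases ih with h | ⟨a, r, rfl, ha⟩
        · have hnc : ¬ ('"' = c) := fun hcc => hc hcc.symm
          exact Or.inl (by simp [h, hnc])
        · have hnc : ¬ ('"' = c) := fun hcc => hc hcc.symm
          exact Or.inr ⟨c :: a, r, rfl, by simp [ha, hnc]⟩

theorem pvFindFrom_two (a b r : List Char) (ha : '"' ∉ a) (hb : '"' ∉ b) :
    pvJ (a ++ '"' :: (b ++ '"' :: r)) = ((a.length + 1 + b.length : Nat) : Int) := by
  unfold pvJ
  rw [pvFind_append a _ ha]
  have hne : ((a.length : Int)) ≠ -1 := by omega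
  rw [if_pos hne]
  have hk : (a.length : Int) + 1 = ((a.length + 1 : Nat) : Int) := by push_cast; ring
  rw [hk, PySem.Chars.findFrom_natCast _ _ (a.length + 1) (by simp only [List.length_append, List.length_cons]; omega)]
  have hdrop : List.drop (a.length + 1) (a ++ '"' :: (b ++ '"' :: r)) = b ++ '"' :: r := by
    have := pvDropPre (a ++ ['"']) (b ++ '"' :: r) 0
    simpa using this
  rw [hdrop, pvFind_append b r hb]
  have : ((b.length : Int)) ≠ -1 := by omega
  rw [if_neg this]
  push_cast; ring

theorem pvJ_no_second (a r : List Char) (ha : '"' ∉ a) (hr : '"' ∉ r) :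
    pvJ (a ++ '"' :: r) = -1 := by
  unfold pvJ
  rw [pvFind_append a r ha]
  have hne : ((a.length : Int)) ≠ -1 := by omega
  rw [if_pos hne]
  have hk : (a.length : Int) + 1 = ((a.length + 1 : Nat) : Int) := by push_cast; ring
  rw [hk, PySem.Chars.findFrom_natCast _ _ (a.length + 1) (by simp only [List.length_append, List.length_cons]; omega)]
  have hdrop : List.drop (a.length + 1) (a ++ '"' :: r) = r := by
    have := pvDropPre (a ++ ['"']) r 0
    simpa using this
  rw [hdrop, pvFind_no_quote hr]
  simp

theorem pvJ_none {s : List Char} (h : '"' ∉ s) : pvJ s = -1 := by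
  unfold pvJ
  rw [pvFind_no_quote h]
  simp

theorem pvJ_slice_lt (rest : List Char) (h : pvJ rest ≠ -1) :
    (PySem.List.slice rest (some (pvJ rest + 1)) none).length < rest.length := by
  rcases pvSplitFirst rest with h1 | ⟨a, r, rfl, ha⟩
  · exact absurd (pvJ_none h1) h
  rcases pvSplitFirst r with h2 | ⟨b, r2, rfl, hb⟩
  · exact absurd (pvJ_no_second a r ha h2) h
  rw [pvFindFrom_two a b r2 ha hb]
  have hj : ((a.length + 1 + b.length : Nat) : Int) + 1 = ((a.length + 1 + b.length + 1 : Nat) : Int) := by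
    push_cast; ring
  rw [hj, PySem.List.slice_from _ (by positivity)]
  simp only [Int.toNat_natCast, List.length_drop, List.length_append, List.length_cons]
  omega

-- B's `while True` scan: per round one quoted piece and the gap's words, then recurse on the tail.
def pvScan (rest : List Char) : List (List Char) × List (List Char) :=
  let i := PySem.Chars.find rest ['"']
  if h : pvJ rest ≠ -1 then
    let r := pvScan (PySem.List.slice rest (some (pvJ rest + 1)) none)
    (PySem.List.slice rest (some (i + 1)) (some (pvJ rest)) :: r.1,
     pvWords (PySem.List.slice rest none (some i)) ++ r.2)
  else ([], pvWords rest)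
termination_by rest.length
decreasing_by exact pvJ_slice_lt rest h

def parse_search_phrase_alt (search_phrase : String) : List String × List String :=
  let r := pvScan search_phrase.toList
  (r.1.map String.mk, r.2.map String.mk)

-- ===== PRECONDITION & SPEC =====
def Spec_parse_search_phrase (search_phrase : String) (out : List String × List String) : Prop := out = parse_search_phrase_alt search_phrase
instance (search_phrase : String) (out : List String × List String) : Decidable (Spec_parse_search_phrase search_phrase out) := by unfold Spec_parse_search_phrase; infer_instance

-- ===== CLAIM (what is proved, stated in full; the proofs are below) =====
def Claim_equal_parse_search_phrase : Prop := ∀ (search_phrase : String), Dom_parse_search_phrase search_phrase → Spec_parse_search_phrase search_phrase (parse_search_phrase search_phrase)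

-- ===== LEMMAS AND PROOFS =====

-- Nat-indexed mirrors of A's pipeline (proof-side only).
def pvQpos : List Char → List Nat
  | [] => []
  | c :: t => if c = '"' then 0 :: (pvQpos t).map (· + 1) else (pvQpos t).map (· + 1)

def pvFixN (l : List Nat) : List Nat := if l.length % 2 ≠ 0 then l.dropLast else l

def pvPairsN : List Nat → List (Nat × Nat)
  | i :: j :: t => (i, j) :: pvPairsN t
  | _ => []

def pvLoopN (cs : List Char) : List (Nat × Nat) → Nat → List (List Char) × List (List Char)
  | [], prev => ([], if prev < cs.length then [cs.drop prev] else [])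
  | (s, t) :: ps, prev =>
      let r := pvLoopN cs ps (t + 1)
      (((cs.drop (s + 1)).take (t - (s + 1))) :: r.1,
       (if prev < s then [(cs.drop prev).take (s - prev)] else []) ++ r.2)

def pvACore (cs : List Char) : List (List Char) × List (List Char) :=
  pvLoopN cs (pvPairsN (pvFixN (pvQpos cs))) 0

theorem pvEnum_filterMap (cs : List Char) (k : Nat) :
    (PySem.List.enumerate cs (k : Int)).filterMap
        (fun p => if p.2 = '"' then some p.1 else none)
      = (pvQpos cs).map (fun n => ((n + k : Nat) : Int)) := by
  induction cs generalizing k with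
  | nil => simp [PySem.List.enumerate_nil, pvQpos]
  | cons c t ih =>
      rw [PySem.List.enumerate_cons, List.filterMap_cons]
      have hcast : ((k : Int) + 1) = ((k + 1 : Nat) : Int) := by push_cast; ring
      rw [hcast, ih (k + 1)]
      by_cases hc : c = '"'
      · simp only [pvQpos, hc, if_true, List.map_cons]
        rw [List.map_map]
        refine List.cons_eq_cons.mpr ⟨by norm_num, ?_⟩
        apply List.map_congr_left; intro n _; simp only [Function.comp_apply]; congr 1; omega
      · simp only [pvQpos, hc, if_false]
        rw [List.map_map]
        apply List.map_congr_left; intro n _; simp only [Function.comp_apply]; congr 1; omega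

theorem pvPairs_map_cast (l : List Nat) :
    pvPairs (l.map (fun n : Nat => (n : Int))) = (pvPairsN l).map (fun p => ((p.1 : Int), (p.2 : Int))) := by
  match l with
  | [] => rfl
  | [i] => rfl
  | i :: j :: t =>
      show ((i : Int), (j : Int)) :: pvPairs (t.map fun n : Nat => (n : Int)) = _
      rw [pvPairs_map_cast t]
      rfl

theorem pvALoop_cast (cs : List Char) (ps : List (Nat × Nat)) (prev : Nat) :
    pvALoop cs (ps.map (fun p => ((p.1 : Int), (p.2 : Int)))) (prev : Int) = pvLoopN cs ps prev := by
  induction ps generalizing prev with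
  | nil =>
      simp only [List.map_nil, pvALoop, pvLoopN]
      rw [PySem.List.slice_from cs (Int.natCast_nonneg prev)]
      simp [Int.toNat_natCast, Nat.cast_lt]
  | cons p ps ih =>
      obtain ⟨st, sp⟩ := p
      simp only [List.map_cons, pvALoop, pvLoopN]
      have h1 : ((st : Int) + 1) = ((st + 1 : Nat) : Int) := by push_cast; ring
      have h2 : ((sp : Int) + 1) = ((sp + 1 : Nat) : Int) := by push_cast; ring
      rw [h1, h2, ih (sp + 1), PySem.List.slice_natCast, PySem.List.slice_natCast]
      congr 1
      split_ifs with ha hb hb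
      · rfl
      · exact absurd (by exact_mod_cast ha) hb
      · exact absurd (by exact_mod_cast hb) ha
      · rfl

theorem pvQpos_no_quote {cs : List Char} (h : '"' ∉ cs) : pvQpos cs = [] := by
  induction cs with
  | nil => rfl
  | cons c t ih =>
      simp only [List.mem_cons, not_or] at h
      have hc : ¬ c = '"' := fun hcc => h.1 hcc.symm
      simp [pvQpos, hc, ih h.2]

theorem pvQpos_append {a : List Char} (r : List Char) (h : '"' ∉ a) :
    pvQpos (a ++ '"' :: r) = a.length :: (pvQpos r).map (· + (a.length + 1)) := by
  induction a with
  | nil => simp [pvQpos]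
  | cons c t ih =>
      simp only [List.mem_cons, not_or] at h
      have hc : ¬ c = '"' := fun hcc => h.1 hcc.symm
      simp only [List.cons_append, pvQpos, hc, if_false, ih h.2, List.map_cons, List.length_cons]
      rw [List.map_map]
      refine List.cons_eq_cons.mpr ⟨rfl, ?_⟩
      apply List.map_congr_left; intro n _; simp only [Function.comp_apply]; omega

theorem pvFixN_cons_cons (x y : Nat) (l : List Nat) : pvFixN (x :: y :: l) = x :: y :: pvFixN l := by
  unfold pvFixN
  rcases eq_or_ne l [] with rfl | hl
  · norm_num
  · simp only [List.length_cons]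
    split_ifs with h1 h2 h2
    · rw [List.dropLast_cons₂, List.dropLast_cons_of_ne_nil hl]
    · omega
    · omega
    · rfl

theorem pvFixN_map_add (K : Nat) (l : List Nat) : pvFixN (l.map (· + K)) = (pvFixN l).map (· + K) := by
  unfold pvFixN
  simp only [List.length_map]
  split_ifs <;> simp [List.map_dropLast]

theorem pvPairsN_map_add (K : Nat) (l : List Nat) :
    pvPairsN (l.map (· + K)) = (pvPairsN l).map (fun p => (p.1 + K, p.2 + K)) := by
  match l with
  | [] => rfl
  | [i] => rfl
  | i :: j :: t =>
      show (i + K, j + K) :: pvPairsN (t.map (· + K)) = _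
      rw [pvPairsN_map_add K t]
      rfl

theorem pvLoopN_shift (pre rest : List Char) (ps : List (Nat × Nat)) (prev : Nat) :
    pvLoopN (pre ++ rest) (ps.map (fun p => (p.1 + pre.length, p.2 + pre.length))) (prev + pre.length)
      = pvLoopN rest ps prev := by
  induction ps generalizing prev with
  | nil =>
      simp only [List.map_nil, pvLoopN, List.length_append]
      rw [show prev + pre.length = pre.length + prev by ring, pvDropPre]
      congr 1
      split_ifs with ha hb hb
      · rfl
      · omega
      · omega
      · rfl
  | cons p ps ih =>
      obtain ⟨st, sp⟩ := p
      simp only [List.map_cons, pvLoopN]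
      rw [show sp + pre.length + 1 = (sp + 1) + pre.length by ring, ih (sp + 1)]
      rw [show sp + pre.length - (st + pre.length + 1) = sp - (st + 1) by omega,
          show st + pre.length - (prev + pre.length) = st - prev by omega]
      rw [show st + pre.length + 1 = pre.length + (st + 1) by ring, pvDropPre,
          show prev + pre.length = pre.length + prev by ring, pvDropPre]
      congr 1
      congr 1
      split_ifs with ha hb hb
      · rfl
      · omega
      · omega
      · rfl

theorem pvWords_nil : pvWords [] = [] := by decide

-- Characterizations of the two sides, then the main list-level equivalence.

theorem pvACore_no {cs : List Char} (h : '"' ∉ cs) :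
    pvACore cs = ([], if 0 < cs.length then [cs] else []) := by
  unfold pvACore
  rw [pvQpos_no_quote h]
  norm_num [pvFixN, pvPairsN, pvLoopN]

theorem pvACore_one {a : List Char} (r : List Char) (ha : '"' ∉ a) (hr : '"' ∉ r) :
    pvACore (a ++ '"' :: r) = ([], [a ++ '"' :: r]) := by
  unfold pvACore
  rw [pvQpos_append r ha, pvQpos_no_quote hr]
  norm_num [pvFixN, pvPairsN, pvLoopN]

theorem pvACore_decomp {a b : List Char} (rest : List Char) (ha : '"' ∉ a) (hb : '"' ∉ b) :
    pvACore (a ++ '"' :: (b ++ '"' :: rest)) =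
      (b :: (pvACore rest).1, (if 0 < a.length then [a] else []) ++ (pvACore rest).2) := by
  unfold pvACore
  rw [pvQpos_append (b ++ '"' :: rest) ha, pvQpos_append rest hb]
  simp only [List.map_cons, List.map_map]
  rw [show (b.length + (a.length + 1)) = a.length + 1 + b.length by ring]
  have hcomp : ((· + (a.length + 1)) ∘ (· + (b.length + 1))) = (· + (a.length + 1 + b.length + 1)) := by
    funext n; simp only [Function.comp_apply]; omega
  rw [hcomp, pvFixN_cons_cons, pvFixN_map_add]
  rw [show pvPairsN (a.length :: (a.length + 1 + b.length) ::
        (pvFixN (pvQpos rest)).map (· + (a.length + 1 + b.length + 1)))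
      = (a.length, a.length + 1 + b.length) ::
        pvPairsN ((pvFixN (pvQpos rest)).map (· + (a.length + 1 + b.length + 1))) from rfl,
    pvPairsN_map_add]
  show pvLoopN _ ((a.length, a.length + 1 + b.length) :: _) 0 = _
  rw [pvLoopN]
  have hpre : a ++ '"' :: (b ++ '"' :: rest) = (a ++ '"' :: b ++ ['"']) ++ rest := by simp
  have hK : (a ++ '"' :: b ++ ['"']).length = a.length + 1 + b.length + 1 := by
    simp [List.length_append]; ring
  have hshift : pvLoopN (a ++ '"' :: (b ++ '"' :: rest))
      ((pvPairsN (pvFixN (pvQpos rest))).map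
        (fun p => (p.1 + (a.length + 1 + b.length + 1), p.2 + (a.length + 1 + b.length + 1))))
      (a.length + 1 + b.length + 1)
      = pvLoopN rest (pvPairsN (pvFixN (pvQpos rest))) 0 := by
    have := pvLoopN_shift (a ++ '"' :: b ++ ['"']) rest (pvPairsN (pvFixN (pvQpos rest))) 0
    rw [hK] at this
    simpa [← hpre] using this
  rw [hshift]
  have hdropq : (a ++ '"' :: (b ++ '"' :: rest)).drop (a.length + 1) = b ++ '"' :: rest := by
    have := pvDropPre (a ++ ['"']) (b ++ '"' :: rest) 0
    simpa using this
  congr 1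
  · rw [hdropq, show a.length + 1 + b.length - (a.length + 1) = b.length by omega,
      List.take_left' rfl]
  · congr 1
    rw [List.drop_zero]
    split_ifs with h
    · rw [Nat.sub_zero, List.take_left' rfl]
    · rfl

theorem pvScan_last {cs : List Char} (h : pvJ cs = -1) : pvScan cs = ([], pvWords cs) := by
  rw [pvScan]
  simp [h]

theorem pvScan_two {a b : List Char} (rest : List Char) (ha : '"' ∉ a) (hb : '"' ∉ b) :
    pvScan (a ++ '"' :: (b ++ '"' :: rest)) =
      (b :: (pvScan rest).1, pvWords a ++ (pvScan rest).2) := by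
  rw [pvScan]
  have hj := pvFindFrom_two a b rest ha hb
  have hne : pvJ (a ++ '"' :: (b ++ '"' :: rest)) ≠ -1 := by rw [hj]; omega
  rw [dif_pos hne]
  rw [pvFind_append a _ ha, hj]
  have h1 : (a.length : Int) + 1 = ((a.length + 1 : Nat) : Int) := by push_cast; ring
  have h2 : ((a.length + 1 + b.length : Nat) : Int) + 1 = ((a.length + 1 + b.length + 1 : Nat) : Int) := by
    push_cast; ring
  rw [h1, h2, PySem.List.slice_natCast, PySem.List.slice_from _ (by positivity),
    PySem.List.slice_to _ (by positivity)]
  have hdropq : (a ++ '"' :: (b ++ '"' :: rest)).drop (a.length + 1) = b ++ '"' :: rest := by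
    have := pvDropPre (a ++ ['"']) (b ++ '"' :: rest) 0
    simpa using this
  have hdropr : (a ++ '"' :: (b ++ '"' :: rest)).drop (a.length + 1 + b.length + 1) = rest := by
    have := pvDropPre (a ++ '"' :: b ++ ['"']) rest 0
    have hK : (a ++ '"' :: b ++ ['"']).length = a.length + 1 + b.length + 1 := by
      simp [List.length_append]; ring
    rw [hK] at this
    simpa using this
  simp only [Int.toNat_natCast, hdropq, hdropr]
  rw [show a.length + 1 + b.length - (a.length + 1) = b.length by omega, List.take_left' rfl,
    List.take_left' rfl]

theorem pvMainAux (N : Nat) : ∀ cs : List Char, cs.length ≤ N →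
    pvScan cs = ((pvACore cs).1, (pvACore cs).2.flatMap pvWords) := by
  induction N with
  | zero =>
      intro cs h
      have hnil : cs = [] := List.eq_nil_of_length_eq_zero (by omega)
      subst hnil
      rw [pvScan_last (pvJ_none (by simp)), pvACore_no (by simp)]
      simp [pvWords_nil]
  | succ N ih =>
      intro cs hlen
      rcases pvSplitFirst cs with h1 | ⟨a, r, hcs, ha⟩
      · rw [pvScan_last (pvJ_none h1), pvACore_no h1]
        rcases eq_or_ne cs [] with rfl | hne
        · simp [pvWords_nil]
        · rw [if_pos (by simpa [List.length_pos_iff] using hne)]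
          simp
      subst hcs
      rcases pvSplitFirst r with h2 | ⟨b, r2, hr, hb⟩
      · rw [pvScan_last (pvJ_no_second a r ha h2), pvACore_one r ha h2]
        simp
      subst hr
      rw [pvScan_two r2 ha hb, pvACore_decomp r2 ha hb,
        ih r2 (by simp only [List.length_append, List.length_cons] at hlen ⊢; omega)]
      simp only [List.flatMap_append]
      rcases Nat.eq_zero_or_pos a.length with h0 | h0
      · have : a = [] := List.eq_nil_of_length_eq_zero h0
        subst this
        simp [pvWords_nil]
      · rw [if_pos h0]
        simp

-- Main list-level equivalence.
theorem pvMain (cs : List Char) :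
    pvScan cs = ((pvACore cs).1, (pvACore cs).2.flatMap pvWords) :=
  pvMainAux cs.length cs le_rfl

-- ===== VERDICT (by name: the statement is the Claim_ definition above) =====
theorem pvIndexes_eq (cs : List Char) :
    (PySem.List.enumerate cs).filterMap (fun p => if p.2 = '"' then some p.1 else none)
      = (pvQpos cs).map (fun n : Nat => (n : Int)) := by
  have h := pvEnum_filterMap cs 0
  rw [show (((0 : Nat)) : Int) = (0 : Int) by norm_num] at h
  rw [h]
  apply List.map_congr_left; intro n _; norm_num

theorem pvFix_eq (cs : List Char) :
    (if ((pvQpos cs).map (fun n : Nat => (n : Int))).length % 2 ≠ 0 then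
        PySem.List.slice ((pvQpos cs).map (fun n : Nat => (n : Int))) (some 0) (some (-1))
      else (pvQpos cs).map (fun n : Nat => (n : Int)))
      = (pvFixN (pvQpos cs)).map (fun n : Nat => (n : Int)) := by
  unfold pvFixN
  rw [List.length_map]
  split_ifs with h
  · rw [PySem.List.slice_zero_start, PySem.List.slice_to_neg_one, List.map_dropLast]
  · rfl

theorem parse_search_phrase_spec : Claim_equal_parse_search_phrase := by
  unfold Claim_equal_parse_search_phrase Spec_parse_search_phrase
  intro s _
  simp only [parse_search_phrase, parse_search_phrase_alt]
  rw [pvIndexes_eq, pvFix_eq, pvPairs_map_cast]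
  have hloop : pvALoop s.toList
      ((pvPairsN (pvFixN (pvQpos s.toList))).map (fun p => ((p.1 : Int), (p.2 : Int)))) 0
      = pvACore s.toList := by
    have := pvALoop_cast s.toList (pvPairsN (pvFixN (pvQpos s.toList))) 0
    simpa using this
  rw [hloop, PySem.List.foldl_append_eq_flatMap, pvMain s.toList]
  simp
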